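-- pv_equiv track=rewrite | github.com/Cato05/SchoolPython | 10/2.félév/sokkód.py | szamok
-- ===== SOURCE A (Python) =====
-- def szamok(a,b,oszt):
--     if a % oszt == 0:
--         tobbszorosok = list(range(a, b, oszt))
--         sorok = list(tobbszorosok[i:i + 10] for i in range(0, len(tobbszorosok), 10))
--         sorok_szovegkent = list(list(str(j) for j in i)for i in sorok)
--         sorok_tabbal = list("\t".join(i) for i in sorok_szovegkent)
--         return "\n".join(sorok_tabbal)
--     else:
--          a = a + (a % oszt)
--          tobbszorosok = list(range(a, b, oszt))
--          sorok = list(tobbszorosok[i:i + 10] for i in range(0, len(tobbszorosok), 10))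
--          sorok_szovegkent = list(list(str(j) for j in i)for i in sorok)
--          sorok_tabbal = list("\t".join(i) for i in sorok_szovegkent)
--          return "\n".join(sorok_tabbal)
-- ===== SOURCE B (Python) =====
-- def szamok(a, b, oszt):
--     if a % oszt:
--         a = a + (a % oszt)
--     parts = []
--     for i, n in enumerate(range(a, b, oszt)):
--         if i:
--             parts.append("\n" if i % 10 == 0 else "\t")
--         parts.append(str(n))
--     return "".join(parts)
-- ===== Notes on version B (the rewrite author's own statement) =====
-- stated objective: simpler
-- what changed: B collapses A's two identical branches into one upfront adjustment and replaces the slice-into-10-chunks / nested string lists / double join with a single flat pass over the range that inserts '\n' or '\t' before each element based on index % 10.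
import Mathlib
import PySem

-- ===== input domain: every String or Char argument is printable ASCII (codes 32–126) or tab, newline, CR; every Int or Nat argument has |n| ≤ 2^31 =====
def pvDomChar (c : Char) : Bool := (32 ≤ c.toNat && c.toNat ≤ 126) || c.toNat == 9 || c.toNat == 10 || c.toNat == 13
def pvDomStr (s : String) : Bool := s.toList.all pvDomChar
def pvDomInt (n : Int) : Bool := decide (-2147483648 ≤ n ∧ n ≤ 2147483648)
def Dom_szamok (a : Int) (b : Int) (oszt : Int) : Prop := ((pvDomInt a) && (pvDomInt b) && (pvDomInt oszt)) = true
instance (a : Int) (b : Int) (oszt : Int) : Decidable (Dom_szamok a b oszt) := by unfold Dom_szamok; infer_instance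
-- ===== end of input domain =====

-- B replaces A's slice-into-chunks / nested-list / double-join structure (and its duplicated branch)
-- by one flat separator-inserting pass over the range; objective: simpler.

-- ===== PORT A =====
def szamok (a : Int) (b : Int) (oszt : Int) : String :=
  if PySem.Int.mod a oszt == 0 then
    let tobbszorosok := PySem.List.pyRange a b oszt
    let sorok := (PySem.List.pyRange 0 (PySem.List.len tobbszorosok) 10).map
      (fun i => PySem.List.slice tobbszorosok (some i) (some (i + 10)))
    let sorok_szovegkent := sorok.map (fun i => i.map PySem.Int.toStr)
    let sorok_tabbal := sorok_szovegkent.map (fun i => PySem.Str.join "\t" i)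
    PySem.Str.join "\n" sorok_tabbal
  else
    let a2 := a + PySem.Int.mod a oszt
    let tobbszorosok := PySem.List.pyRange a2 b oszt
    let sorok := (PySem.List.pyRange 0 (PySem.List.len tobbszorosok) 10).map
      (fun i => PySem.List.slice tobbszorosok (some i) (some (i + 10)))
    let sorok_szovegkent := sorok.map (fun i => i.map PySem.Int.toStr)
    let sorok_tabbal := sorok_szovegkent.map (fun i => PySem.Str.join "\t" i)
    PySem.Str.join "\n" sorok_tabbal

-- ===== PORT B =====
def szamok_alt (a : Int) (b : Int) (oszt : Int) : String :=
  let a2 := if PySem.Int.mod a oszt != 0 then a + PySem.Int.mod a oszt else a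
  let parts := (PySem.List.enumerate (PySem.List.pyRange a2 b oszt)).foldl
    (fun parts p =>
      (if p.1 != 0 then
        parts ++ [if PySem.Int.mod p.1 10 == 0 then "\n" else "\t"]
      else parts) ++ [PySem.Int.toStr p.2]) []
  PySem.Str.join "" parts

-- ===== PRECONDITION & SPEC =====
-- Pre_ excludes exactly oszt = 0, on which Python's 'a % oszt' raises ZeroDivisionError.
def Pre_szamok (a : Int) (b : Int) (oszt : Int) : Prop := oszt ≠ 0
instance (a : Int) (b : Int) (oszt : Int) : Decidable (Pre_szamok a b oszt) := by unfold Pre_szamok; infer_instance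
def pvWitness_szamok : Int × Int × Int := (3, 100, 4)

def Spec_szamok (a : Int) (b : Int) (oszt : Int) (out : String) : Prop := out = szamok_alt a b oszt
instance (a : Int) (b : Int) (oszt : Int) (out : String) : Decidable (Spec_szamok a b oszt out) := by unfold Spec_szamok; infer_instance

-- ===== CLAIM (what is proved, stated in full; the proofs are below) =====
def Claim_equal_szamok : Prop := ∀ (a : Int) (b : Int) (oszt : Int), Dom_szamok a b oszt → Pre_szamok a b oszt → Spec_szamok a b oszt (szamok a b oszt)

-- ===== LEMMAS AND PROOFS =====

-- A's row structure, as a recursion peeling ten elements at a time.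
def chunks10 (ys : List Int) : List (List Int) :=
  if h : ys = [] then [] else ys.take 10 :: chunks10 (ys.drop 10)
termination_by ys.length
decreasing_by have := List.length_pos_of_ne_nil h; simp [List.length_drop]; omega

def rowC (r : List Int) : List Char := PySem.Chars.join ['\t'] (r.map PySem.Int.toChars)
def renderC (ys : List Int) : List Char := PySem.Chars.join ['\n'] ((chunks10 ys).map rowC)
-- B's per-element output (separator followed by the digits), on the char level.
def sepC (k : Int) : List Char :=
  if k == 0 then [] else if PySem.Int.mod k 10 == 0 then ['\n'] else ['\t']
def glC (p : Int × Int) : List Char := sepC p.1 ++ PySem.Int.toChars p.2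
def gStr (p : Int × Int) : List String :=
  (if p.1 != 0 then [if PySem.Int.mod p.1 10 == 0 then "\n" else "\t"] else []) ++ [PySem.Int.toStr p.2]

theorem chunks10_nil : chunks10 [] = [] := by rw [chunks10.eq_def]; simp

theorem chunks10_cons (ys : List Int) (h : ys ≠ []) :
    chunks10 ys = ys.take 10 :: chunks10 (ys.drop 10) := by
  rw [chunks10.eq_def]; simp [h]

theorem chunks_eq : ∀ (n : Nat) (ys : List Int), ys.length ≤ n →
    (PySem.List.pyRange 0 (PySem.List.len ys) 10).map
      (fun i => PySem.List.slice ys (some i) (some (i + 10))) = chunks10 ys := by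
  intro n
  induction n with
  | zero =>
    intro ys h
    have : ys = [] := List.eq_nil_of_length_eq_zero (Nat.le_zero.mp h)
    subst this
    rw [PySem.List.pyRange_of_pos _ _ (by norm_num : (0:Int) < 10)]
    simp [chunks10_nil]
  | succ n ih =>
    intro ys h
    by_cases hys : ys = []
    · subst hys
      rw [PySem.List.pyRange_of_pos _ _ (by norm_num : (0:Int) < 10)]
      simp [chunks10_nil]
    · have hpos : 0 < ys.length := List.length_pos_of_ne_nil hys
      rw [chunks10_cons ys hys,
        ← ih (ys.drop 10) (by simp; omega)]
      rw [PySem.List.pyRange_of_pos _ _ (by norm_num : (0:Int) < 10),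
        PySem.List.pyRange_of_pos _ _ (by norm_num : (0:Int) < 10)]
      simp only [PySem.List.len_eq, List.map_map, List.length_drop]
      have hC : (if (0:Int) < ↑ys.length then (((ys.length:Int) - 0 + 10 - 1) / 10).toNat else 0)
          = (if (0:Int) < ↑(ys.length - 10) then ((((ys.length - 10 : Nat):Int) - 0 + 10 - 1) / 10).toNat else 0) + 1 := by
        split <;> split <;> omega
      rw [hC, List.range_succ_eq_map]
      simp only [List.map_cons, List.map_map]
      congr 1
      · show PySem.List.slice ys (some ((0:Int) + 10 * (0:Nat))) (some ((0:Int) + 10 * (0:Nat) + 10)) = ys.take 10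
        norm_num
        rw [PySem.List.slice_to ys (by norm_num : (0:Int) ≤ 10)]
        rfl
      · apply List.map_congr_left
        intro j _
        show PySem.List.slice ys (some ((0:Int) + 10 * ((j+1:Nat):Int))) (some ((0:Int) + 10 * ((j+1:Nat):Int) + 10))
          = PySem.List.slice (ys.drop 10) (some ((0:Int) + 10 * (j:Int))) (some ((0:Int) + 10 * (j:Int) + 10))
        have e1 : (0:Int) + 10 * ((j+1:Nat):Int) = ((10*j+10 : Nat) : Int) := by push_cast; ring
        have e2 : ((10*j+10 : Nat) : Int) + 10 = ((10*j+20 : Nat) : Int) := by push_cast; ring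
        have e3 : (0:Int) + 10 * ((j:Nat):Int) = ((10*j : Nat) : Int) := by push_cast; ring
        have e4 : ((10*j : Nat) : Int) + 10 = ((10*j+10 : Nat) : Int) := by push_cast; ring
        rw [e1, e2, e3, e4, PySem.List.slice_natCast, PySem.List.slice_natCast, List.drop_drop]
        have e5 : 10 + 10 * j = 10 * j + 10 := by omega
        rw [e5]
        congr 1
        omega

theorem renderC_cons (ys : List Int) (h : ys ≠ []) :
    renderC ys = rowC (ys.take 10) ++
      (if ys.drop 10 = [] then [] else '\n' :: renderC (ys.drop 10)) := by
  by_cases hd : ys.drop 10 = []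
  · simp [renderC, chunks10_cons ys h, hd, chunks10_nil, PySem.Chars.join_singleton]
  · cases hc : chunks10 (ys.drop 10) with
    | nil => rw [chunks10_cons _ hd] at hc; simp at hc
    | cons c cs =>
      simp [renderC, chunks10_cons ys h, hc, hd, PySem.Chars.join_cons_cons]

-- tail of a row: every index is nonzero and not divisible by 10, so the separator is a tab
theorem tail_flat : ∀ (l : List Int) (k : Int),
    (∀ j : Nat, j < l.length → (k + j) % 10 ≠ 0) →
    ((PySem.List.enumerate l k).map glC).flatten
      = l.flatMap (fun x => '\t' :: PySem.Int.toChars x) := by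
  intro l
  induction l with
  | nil => intro k h; simp
  | cons x t ih =>
    intro k h
    have hk : (k + (0 : Nat)) % 10 ≠ 0 := h 0 (by simp)
    have hk10 : k % 10 ≠ 0 := by simpa using hk
    have hkz : k ≠ 0 := by intro e; rw [e] at hk10; simp at hk10
    have hsep : sepC k = ['\t'] := by simp [sepC, hkz, hk10]
    simp only [PySem.List.enumerate_cons, List.map_cons, List.flatten_cons,
      List.flatMap_cons, glC, hsep]
    rw [ih (k + 1) (by
      intro j hj
      have := h (j + 1) (by simpa using Nat.succ_lt_succ hj)
      intro e; apply this; push_cast at e ⊢; omega)]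
    simp

theorem row_flatMap : ∀ (l : List Int) (x : Int),
    rowC (x :: l) = PySem.Int.toChars x ++ l.flatMap (fun x => '\t' :: PySem.Int.toChars x) := by
  intro l
  induction l with
  | nil => intro x; simp [rowC, PySem.Chars.join_singleton]
  | cons y t ih =>
    intro x
    have : rowC (x :: y :: t)
        = PySem.Int.toChars x ++ ['\t'] ++ rowC (y :: t) := by
      simp [rowC, PySem.Chars.join_cons_cons]
    rw [this, ih y]
    simp

-- one chunk (at most 10 elements, starting index a multiple of 10)
theorem chunk_flat (l : List Int) (k : Int) (hk : k % 10 = 0)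
    (hne : l ≠ []) (hlen : l.length ≤ 10) :
    ((PySem.List.enumerate l k).map glC).flatten
      = (if k = 0 then [] else ['\n']) ++ rowC l := by
  cases l with
  | nil => exact absurd rfl hne
  | cons x t =>
    have hsep : sepC k = if k = 0 then [] else ['\n'] := by
      by_cases hz : k = 0 <;> simp [sepC, hz, hk]
    simp only [PySem.List.enumerate_cons, List.map_cons, List.flatten_cons, glC, hsep]
    rw [tail_flat t (k + 1) (by
      intro j hj
      have hjl : j < 9 := by
        have := hlen; simp at this; omega
      omega)]
    rw [row_flatMap t x]
    simp

theorem main_flat : ∀ (n : Nat) (ys : List Int) (k : Int), ys.length ≤ n → 0 ≤ k → k % 10 = 0 →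
    ((PySem.List.enumerate ys k).map glC).flatten
      = if ys = [] then [] else (if k = 0 then [] else ['\n']) ++ renderC ys := by
  intro n
  induction n with
  | zero =>
    intro ys k h _ _
    have : ys = [] := List.eq_nil_of_length_eq_zero (Nat.le_zero.mp h)
    simp [this]
  | succ n ih =>
    intro ys k h hk0 hk
    by_cases hys : ys = []
    · simp [hys]
    · have hpos : 0 < ys.length := List.length_pos_of_ne_nil hys
      conv_lhs => rw [← List.take_append_drop 10 ys]
      rw [PySem.List.enumerate_append]
      simp only [List.map_append, List.flatten_append]
      rw [chunk_flat (ys.take 10) k hk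
        (by simp; omega) (by simp)]
      by_cases hd : ys.drop 10 = []
      · have : PySem.List.enumerate (ys.drop 10) (k + ↑(ys.take 10).length) = [] := by
          rw [hd]; rfl
        rw [this, renderC_cons ys hys]
        simp [hys, hd]
      · have hlen10 : (ys.take 10).length = 10 := by
          simp at hd ⊢; omega
        rw [hlen10]
        have hcast : k + ((10:Nat) : Int) = k + 10 := by norm_num
        rw [hcast]
        rw [ih (ys.drop 10) (k + 10) (by simp at hd ⊢; omega)
          (by omega) (by omega)]
        rw [renderC_cons ys hys]
        have hkz : ¬ (k + (10 : Int) = 0) := by omega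
        simp [hys, hd, hkz]

theorem bfold (l : List (Int × Int)) (acc : List String) :
    l.foldl (fun parts p =>
      (if p.1 != 0 then
        parts ++ [if PySem.Int.mod p.1 10 == 0 then "\n" else "\t"]
      else parts) ++ [PySem.Int.toStr p.2]) acc = acc ++ l.flatMap gStr := by
  induction l generalizing acc with
  | nil => simp
  | cons p t ih =>
    simp only [List.foldl_cons, List.flatMap_cons, ih, gStr]
    by_cases h : p.1 = 0 <;> simp [h]

theorem b_chars (l : List (Int × Int)) :
    (PySem.Str.join "" (l.flatMap gStr)).toList = (l.map glC).flatten := by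
  rw [PySem.Str.toList_join]
  have hnil : ∀ ps : List (List Char), PySem.Chars.join [] ps = ps.flatten := by
    intro ps
    induction ps with
    | nil => simp [PySem.Chars.join_nil]
    | cons p q ih =>
      cases q with
      | nil => simp [PySem.Chars.join_singleton]
      | cons r rs => rw [PySem.Chars.join_cons_cons]; simp_all
  have : ("" : String).toList = [] := rfl
  rw [this, hnil]
  induction l with
  | nil => simp
  | cons p t ih =>
    simp only [List.flatMap_cons, List.map_append, List.map_cons, List.flatten_append,
      List.flatten_cons, ih]
    congr 1
    by_cases hz : p.1 = 0
    · simp [gStr, glC, sepC, hz, PySem.Int.toList_toStr]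
    · by_cases h10 : PySem.Int.mod p.1 10 = 0 <;>
        simp [gStr, glC, sepC, hz, PySem.Int.toList_toStr] <;> split <;> rfl

theorem core (ys : List Int) :
    PySem.Str.join "\n"
      ((((PySem.List.pyRange 0 (PySem.List.len ys) 10).map
          (fun i => PySem.List.slice ys (some i) (some (i + 10)))).map
            (fun i => i.map PySem.Int.toStr)).map (fun i => PySem.Str.join "\t" i))
    = PySem.Str.join "" ((PySem.List.enumerate ys).foldl
        (fun parts p =>
          (if p.1 != 0 then
            parts ++ [if PySem.Int.mod p.1 10 == 0 then "\n" else "\t"]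
          else parts) ++ [PySem.Int.toStr p.2]) []) := by
  apply String.toList_inj.mp
  rw [bfold, List.nil_append, b_chars, chunks_eq ys.length ys le_rfl, PySem.Str.toList_join]
  rw [main_flat ys.length ys 0 le_rfl le_rfl (by norm_num)]
  have hrow : List.map String.toList
      (((chunks10 ys).map (fun i => i.map PySem.Int.toStr)).map (fun i => PySem.Str.join "\t" i))
      = (chunks10 ys).map rowC := by
    simp only [List.map_map]
    apply List.map_congr_left
    intro r _
    show (PySem.Str.join "\t" (r.map PySem.Int.toStr)).toList = rowC r
    rw [PySem.Str.toList_join]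
    have hmap : List.map String.toList (r.map PySem.Int.toStr) = r.map PySem.Int.toChars := by
      rw [List.map_map]
      apply List.map_congr_left
      intro x _
      exact PySem.Int.toList_toStr x
    rw [hmap]
    rfl
  rw [hrow]
  by_cases hys : ys = []
  · simp [hys, chunks10_nil, PySem.Chars.join_nil]
  · simp [hys, renderC]

-- ===== VERDICT (by name: the statement is the Claim_ definition above) =====
theorem szamok_spec : Claim_equal_szamok := by
  intro a b oszt _ _
  unfold Spec_szamok szamok szamok_alt
  by_cases h : PySem.Int.mod a oszt = 0
  · simp only [h, BEq.rfl, if_true, bne_self_eq_false, Bool.false_eq_true, if_false]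
    simpa [h] using core (PySem.List.pyRange a b oszt)
  · have hb : (PySem.Int.mod a oszt == 0) = false := by simp [h]
    have hbne : (PySem.Int.mod a oszt != 0) = true := by simp [h]
    simp only [hb, Bool.false_eq_true, if_false, hbne, if_true]
    exact core (PySem.List.pyRange (a + PySem.Int.mod a oszt) b oszt)
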